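-- pv_equiv track=rewrite | github.com/kbreivik/ai-local-agent-tools | mcp_server/tools/elastic.py | _suggest_filter_fields
-- ===== SOURCE A (Python) =====
-- _SCHEMA_SERVICE_PATTERNS = (
--     "service.name",
--     "container.name",
--     "kubernetes.labels.app",
--     "docker.container.name",
--     "fields.service",
--     "beat.name",
--     "docker.container.labels.com.docker.swarm.service.name",
-- )
--
-- _SCHEMA_HOST_PATTERNS = (
--     "host.name",
--     "host.hostname",
--     "agent.hostname",
--     "kubernetes.node.name",
--     "beat.hostname",
-- )
--
-- _SCHEMA_LEVEL_PATTERNS = (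
--     "log.level",
--     "level",
--     "severity",
--     "log_level",
--     "fields.level",
--     "loglevel",
-- )
--
-- def _suggest_filter_fields(available_fields: dict) -> list:
--     """Match known shipper field patterns against discovered fields."""
--     def match(patterns, category):
--         hits = [f for f in available_fields if f in patterns]
--         if hits:
--             first = hits[0]
--             return {
--                 "category": category,
--                 "field": first,
--                 "example": available_fields[first].get("example"),
--             }
--         return None
--     return [r for r in [
--         match(_SCHEMA_SERVICE_PATTERNS, "service"),
--         match(_SCHEMA_HOST_PATTERNS, "host"),
--         match(_SCHEMA_LEVEL_PATTERNS, "level"),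
--     ] if r]
-- ===== SOURCE B (Python) =====
-- _CATEGORY_OF = {
--     **{p: "service" for p in (
--         "service.name",
--         "container.name",
--         "kubernetes.labels.app",
--         "docker.container.name",
--         "fields.service",
--         "beat.name",
--         "docker.container.labels.com.docker.swarm.service.name",
--     )},
--     **{p: "host" for p in (
--         "host.name",
--         "host.hostname",
--         "agent.hostname",
--         "kubernetes.node.name",
--         "beat.hostname",
--     )},
--     **{p: "level" for p in (
--         "log.level",
--         "level",
--         "severity",
--         "log_level",
--         "fields.level",
--         "loglevel",
--     )},
-- }
--
--
-- def _suggest_filter_fields(available_fields: dict) -> list: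
--     """Match known shipper field patterns against discovered fields (single pass)."""
--     first = {}
--     for f in available_fields:
--         c = _CATEGORY_OF.get(f)
--         if c is not None and c not in first:
--             first[c] = f
--     out = []
--     for c in ("service", "host", "level"):
--         if c in first:
--             fld = first[c]
--             out.append({
--                 "category": c,
--                 "field": fld,
--                 "example": available_fields[fld].get("example"),
--             })
--     return out
-- ===== Notes on version B (the rewrite author's own statement) =====
-- stated objective: alternative
-- what changed: Replaces A's three separate scans of the field list (one per pattern group) by a single pattern-to-category dict built once and one pass over available_fields recording the first field seen per category, then emits rows in the fixed service/host/level order.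
import Mathlib
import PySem

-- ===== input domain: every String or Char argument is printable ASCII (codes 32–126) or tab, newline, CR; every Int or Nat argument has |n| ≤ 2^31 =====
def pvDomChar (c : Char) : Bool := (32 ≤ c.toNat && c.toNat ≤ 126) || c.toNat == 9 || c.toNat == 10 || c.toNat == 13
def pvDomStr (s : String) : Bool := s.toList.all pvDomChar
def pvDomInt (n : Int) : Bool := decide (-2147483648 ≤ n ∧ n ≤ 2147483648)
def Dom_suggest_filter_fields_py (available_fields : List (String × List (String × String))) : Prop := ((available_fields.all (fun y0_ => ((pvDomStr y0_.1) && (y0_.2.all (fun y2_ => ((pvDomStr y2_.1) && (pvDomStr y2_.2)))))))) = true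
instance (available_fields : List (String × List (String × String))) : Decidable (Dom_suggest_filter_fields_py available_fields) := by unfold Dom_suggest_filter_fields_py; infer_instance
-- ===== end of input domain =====

-- B replaces A's three restricted scans by one pattern→category index and a single
-- first-seen-per-category pass (objective: alternative single-pass decomposition).

-- ===== PORT A =====
def pvSp : List String := ["service.name","container.name","kubernetes.labels.app","docker.container.name","fields.service","beat.name","docker.container.labels.com.docker.swarm.service.name"]
def pvHp : List String := ["host.name","host.hostname","agent.hostname","kubernetes.node.name","beat.hostname"]
def pvLp : List String := ["log.level","level","severity","log_level","fields.level","loglevel"]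

-- available_fields[f].get("example"): first-match lookup of f, then of "example".
-- Under Pre_ the "example" entry is present; the "" defaults are only reached
-- outside Pre_ (where Python's value would be None, not a String).
def pvExampleOf (af : List (String × List (String × String))) (f : String) : String :=
  match af.find? (fun p => p.1 == f) with
  | some (_, v) =>
    match v.find? (fun q => q.1 == "example") with
    | some (_, e) => e
    | none => ""
  | none => ""

def pvMatchA (af : List (String × List (String × String))) (patterns : List String) (category : String) : Option (List (String × String)) :=
  match (af.map (·.1)).filter (fun f => patterns.contains f) with
  | [] => none
  | first :: _ => some [("category", category), ("field", first), ("example", pvExampleOf af first)]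

def suggest_filter_fields_py (available_fields : List (String × List (String × String))) : List (List (String × String)) :=
  ([pvMatchA available_fields pvSp "service",
    pvMatchA available_fields pvHp "host",
    pvMatchA available_fields pvLp "level"]).filterMap id

-- ===== PORT B =====
def pvBSp : List String := ["service.name","container.name","kubernetes.labels.app","docker.container.name","fields.service","beat.name","docker.container.labels.com.docker.swarm.service.name"]
def pvBHp : List String := ["host.name","host.hostname","agent.hostname","kubernetes.node.name","beat.hostname"]
def pvBLp : List String := ["log.level","level","severity","log_level","fields.level","loglevel"]

-- _CATEGORY_OF: one dict mapping each pattern to its category (the keys are distinct).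
def pvCatDict : List (String × String) :=
  pvBSp.map (fun p => (p, "service")) ++ pvBHp.map (fun p => (p, "host")) ++ pvBLp.map (fun p => (p, "level"))

def pvCatOf (f : String) : Option String := (pvCatDict.find? (fun q => q.1 == f)).map (·.2)

-- one step of the single pass: record the field as the first match of its category
def pvStep (d : PySem.Dict String String) (p : String × List (String × String)) : PySem.Dict String String :=
  match pvCatOf p.1 with
  | none => d
  | some c => if d.contains c then d else d.insert c p.1

def suggest_filter_fields_py_alt (available_fields : List (String × List (String × String))) : List (List (String × String)) :=
  let first := available_fields.foldl pvStep PySem.Dict.empty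
  (["service", "host", "level"]).foldl (fun out c =>
    match first.get? c with
    | none => out
    | some fld => out ++ [[("category", c), ("field", fld), ("example", pvExampleOf available_fields fld)]]) []

-- ===== PRECONDITION & SPEC =====
-- Pre_ excludes inputs where the first discovered field of some category has no
-- "example" entry: there Python A returns None as "example", which is not a String
-- of the declared output type (B's Python returns the same None there).
def Pre_suggest_filter_fields_py (available_fields : List (String × List (String × String))) : Prop :=
  ∀ pats ∈ [pvSp, pvHp, pvLp],
    ∀ f ∈ ((available_fields.map (·.1)).filter (fun f => pats.contains f)).head?,
      ∀ v ∈ (available_fields.find? (fun p => p.1 == f)),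
        (v.2.map (·.1)).contains "example" = true

instance (available_fields : List (String × List (String × String))) : Decidable (Pre_suggest_filter_fields_py available_fields) := by unfold Pre_suggest_filter_fields_py; infer_instance

def pvWitness_suggest_filter_fields_py : (List (String × List (String × String))) :=
  [("level", [("example", "warn")]), ("host.name", [("example", "web-1")])]

def Spec_suggest_filter_fields_py (available_fields : List (String × List (String × String))) (out : List (List (String × String))) : Prop := out = suggest_filter_fields_py_alt available_fields
instance (available_fields : List (String × List (String × String))) (out : List (List (String × String))) : Decidable (Spec_suggest_filter_fields_py available_fields out) := by unfold Spec_suggest_filter_fields_py; infer_instance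

-- ===== CLAIM (what is proved, stated in full; the proofs are below) =====
def Claim_equal_suggest_filter_fields_py : Prop := ∀ (available_fields : List (String × List (String × String))), Dom_suggest_filter_fields_py available_fields → Pre_suggest_filter_fields_py available_fields → Spec_suggest_filter_fields_py available_fields (suggest_filter_fields_py available_fields)

-- ===== LEMMAS AND PROOFS =====

set_option maxRecDepth 4096 in
-- exactly one of the four regions holds, and pvCatOf is determined on each
theorem pvCatOf_cases (f : String) :
    (f ∈ pvSp ∧ f ∉ pvHp ∧ f ∉ pvLp ∧ pvCatOf f = some "service")
  ∨ (f ∉ pvSp ∧ f ∈ pvHp ∧ f ∉ pvLp ∧ pvCatOf f = some "host")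
  ∨ (f ∉ pvSp ∧ f ∉ pvHp ∧ f ∈ pvLp ∧ pvCatOf f = some "level")
  ∨ (f ∉ pvSp ∧ f ∉ pvHp ∧ f ∉ pvLp ∧ pvCatOf f = none) := by
  by_cases h1 : f ∈ pvSp
  · left
    simp only [pvSp] at h1
    fin_cases h1 <;> exact ⟨by decide, by decide, by decide, by decide⟩
  · by_cases h2 : f ∈ pvHp
    · right; left
      simp only [pvHp] at h2
      fin_cases h2 <;> exact ⟨by decide, by decide, by decide, by decide⟩
    · by_cases h3 : f ∈ pvLp
      · right; right; left
        simp only [pvLp] at h3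
        fin_cases h3 <;> exact ⟨by decide, by decide, by decide, by decide⟩
      · right; right; right
        refine ⟨h1, h2, h3, ?_⟩
        have hnone : pvCatDict.find? (fun q => q.1 == f) = none := by
          rw [List.find?_eq_none]
          intro x hx
          simp only [pvSp, List.mem_cons, List.not_mem_nil, or_false, not_or] at h1
          simp only [pvHp, List.mem_cons, List.not_mem_nil, or_false, not_or] at h2
          simp only [pvLp, List.mem_cons, List.not_mem_nil, or_false, not_or] at h3
          simp only [pvCatDict, pvBSp, pvBHp, pvBLp, List.map_cons, List.map_nil,
            List.cons_append, List.nil_append, List.mem_cons, List.not_mem_nil, or_false] at hx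
          rcases hx with h | h | h | h | h | h | h | h | h | h | h | h | h | h | h | h | h | h <;>
            subst h <;> simp only [beq_iff_eq] <;> rintro rfl <;> simp_all
        simp [pvCatOf, hnone]

theorem pred_service (f : String) : (pvCatOf f == some "service") = pvSp.contains f := by
  rcases pvCatOf_cases f with ⟨h1, h2, h3, hc⟩ | ⟨h1, h2, h3, hc⟩ | ⟨h1, h2, h3, hc⟩ | ⟨h1, h2, h3, hc⟩ <;>
    simp [hc, h1]

theorem pred_host (f : String) : (pvCatOf f == some "host") = pvHp.contains f := by
  rcases pvCatOf_cases f with ⟨h1, h2, h3, hc⟩ | ⟨h1, h2, h3, hc⟩ | ⟨h1, h2, h3, hc⟩ | ⟨h1, h2, h3, hc⟩ <;>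
    simp [hc, h2]

theorem pred_level (f : String) : (pvCatOf f == some "level") = pvLp.contains f := by
  rcases pvCatOf_cases f with ⟨h1, h2, h3, hc⟩ | ⟨h1, h2, h3, hc⟩ | ⟨h1, h2, h3, hc⟩ | ⟨h1, h2, h3, hc⟩ <;>
    simp [hc, h3]

-- the single pass records, per category, the first field whose category matches
theorem pvFold_get? (af : List (String × List (String × String))) (d : PySem.Dict String String) (c : String) :
    (af.foldl pvStep d).get? c = (d.get? c).or ((af.map (·.1)).find? (fun f => pvCatOf f == some c)) := by
  induction af generalizing d with
  | nil => simp
  | cons p rest ih =>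
    simp only [List.foldl_cons, List.map_cons]
    rw [ih]
    unfold pvStep
    cases h : pvCatOf p.1 with
    | none =>
      rw [List.find?_cons_of_neg (by simp [h])]
    | some c' =>
      by_cases hc : c' = c
      · subst hc
        rw [List.find?_cons_of_pos (by simp [h])]
        by_cases hd : d.contains c' = true
        · simp only [if_pos hd]
          have hs : (d.get? c').isSome = true := by
            rw [← PySem.Dict.contains_eq_isSome_get?]; exact hd
          obtain ⟨v, hv⟩ := Option.isSome_iff_exists.mp hs
          rw [hv]
          simp
        · simp only [if_neg hd]
          have h0 : d.get? c' = none := by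
            rw [PySem.Dict.get?_eq_none_iff_contains]
            exact Bool.of_not_eq_true hd
          rw [PySem.Dict.get?_insert_self, h0]
          simp
      · rw [List.find?_cons_of_neg (by simp [h, hc])]
        by_cases hd : d.contains c' = true
        · simp only [if_pos hd]
        · simp only [if_neg hd]
          rw [PySem.Dict.get?_insert]
          simp [Ne.symm hc]

-- B's per-category lookup, as a find? over the field names
theorem pvAlt_cat (af : List (String × List (String × String))) (c : String) :
    (af.foldl pvStep PySem.Dict.empty).get? c
      = (af.map (·.1)).find? (fun f => pvCatOf f == some c) := by
  rw [pvFold_get?]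
  simp

-- A's per-category match, written as a map over that same find?
theorem pvMatch_eq (af : List (String × List (String × String))) (pats : List String) (cat : String)
    (h : ∀ f, (pvCatOf f == some cat) = pats.contains f) :
    ((af.map (·.1)).find? (fun f => pvCatOf f == some cat)).map
        (fun first => [("category", cat), ("field", first), ("example", pvExampleOf af first)])
      = pvMatchA af pats cat := by
  rw [← List.head?_filter, List.filter_congr (fun x _ => h x)]
  unfold pvMatchA
  cases h' : (af.map (·.1)).filter (fun f => pats.contains f) <;> simp

-- ===== VERDICT (by name: the statement is the Claim_ definition above) =====
theorem suggest_filter_fields_py_spec : Claim_equal_suggest_filter_fields_py := by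
  intro af _ _
  unfold Spec_suggest_filter_fields_py
  simp only [suggest_filter_fields_py, suggest_filter_fields_py_alt,
    List.foldl_cons, List.foldl_nil, pvAlt_cat]
  rw [← pvMatch_eq af pvSp "service" pred_service,
      ← pvMatch_eq af pvHp "host" pred_host,
      ← pvMatch_eq af pvLp "level" pred_level]
  cases (af.map (·.1)).find? (fun f => pvCatOf f == some "service") <;>
    cases (af.map (·.1)).find? (fun f => pvCatOf f == some "host") <;>
      cases (af.map (·.1)).find? (fun f => pvCatOf f == some "level") <;>
        simp [List.filterMap]
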